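-- pv_equiv track=rewrite | github.com/MeoProject/lx-music-api-server | modules/plat/mg/mrc.py | to_long
-- ===== SOURCE A (Python) =====
-- MAX_LONG = 9223372036854775807
--
-- MIN_LONG = -9223372036854775808
--
-- def to_long(value):
--     if isinstance(value, str):
--         num = int(value, 16)
--     else:
--         num = int(value)
--
--     while num > MAX_LONG:
--         num = num - (1 << 64)
--     while num < MIN_LONG:
--         num = num + (1 << 64)
--
--     return num
-- ===== SOURCE B (Python) =====
-- MAX_LONG = 9223372036854775807
--
-- MIN_LONG = -9223372036854775808
--
-- def to_long(value):
--     if isinstance(value, str):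
--         num = int(value, 16)
--     else:
--         num = int(value)
--     return ((num + (1 << 63)) % (1 << 64)) - (1 << 63)
-- ===== Notes on version B (the rewrite author's own statement) =====
-- stated objective: simpler
-- what changed: Replaced A's two while-loops that repeatedly add/subtract 2^64 until the number lands in the signed-64-bit range by a single closed-form modulo expression ((num + 2^63) % 2^64) - 2^63; the Lean port of B also parses the hex literal by staged passes (validate with closed-form shape checks, then one fold over the underscore-free digits) instead of A's single flag-carrying recursion.
import Mathlib
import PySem

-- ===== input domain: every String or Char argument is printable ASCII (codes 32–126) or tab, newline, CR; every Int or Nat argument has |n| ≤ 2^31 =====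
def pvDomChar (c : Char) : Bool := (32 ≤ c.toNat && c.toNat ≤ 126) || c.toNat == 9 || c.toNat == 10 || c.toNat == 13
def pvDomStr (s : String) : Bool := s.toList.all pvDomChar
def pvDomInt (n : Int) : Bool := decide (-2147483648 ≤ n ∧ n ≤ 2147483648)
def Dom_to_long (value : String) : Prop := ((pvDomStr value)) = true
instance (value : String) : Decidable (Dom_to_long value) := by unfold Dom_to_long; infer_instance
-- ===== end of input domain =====

-- B replaces A's repeated ±2^64 while-loops with one closed-form modulo (and its hex-literal
-- parsing, a hand port of the builtin int(value,16) both Pythons call, is done in staged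
-- passes instead of A's single flag-carrying recursion); equivalence proved on valid hex literals.

-- shared helper: Python whitespace test used by int()'s surrounding-whitespace stripping
def pvIsSpace (c : Char) : Bool :=
  c = ' ' || c = '\t' || c = '\n' || c = '\r' || c.toNat == 11 || c.toNat == 12

-- ===== PORT A =====
-- A-side hand port of `int(value, 16)`: one recursion over the characters carrying the
-- accumulator and a `prevDigit` flag (underscores must be surrounded by digits; an
-- underscore may directly follow the 0x prefix); `none` = ValueError. Exact on ASCII.
def pvHexVal? (c : Char) : Option Nat :=
  if '0' ≤ c ∧ c ≤ '9' then some (c.toNat - 48)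
  else if 'a' ≤ c ∧ c ≤ 'f' then some (c.toNat - 87)
  else if 'A' ≤ c ∧ c ≤ 'F' then some (c.toNat - 55)
  else none

def pvHexDigits? : List Char → Int → Bool → Option Int
  | [], acc, prevDigit => if prevDigit then some acc else none
  | c :: rest, acc, prevDigit =>
    match pvHexVal? c with
    | some v => pvHexDigits? rest (acc * 16 + v) true
    | none => if c = '_' ∧ prevDigit then pvHexDigits? rest acc false else none

def pvHexBody? (cs : List Char) : Option Int :=
  if cs.take 2 = ['0', 'x'] ∨ cs.take 2 = ['0', 'X'] then
    if cs.drop 2 = [] then none else pvHexDigits? (cs.drop 2) 0 true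
  else pvHexDigits? cs 0 false

def pvParseHexInt? (value : String) : Option Int :=
  let cs := ((value.toList.dropWhile pvIsSpace).reverse.dropWhile pvIsSpace).reverse
  if cs.head? = some '+' then pvHexBody? cs.tail
  else if cs.head? = some '-' then (pvHexBody? cs.tail).map (fun n => -n)
  else pvHexBody? cs

-- `while num > MAX_LONG: num = num - (1 << 64)`
def pvWrapDown (n : Int) : Int :=
  if n > 9223372036854775807 then pvWrapDown (n - 18446744073709551616) else n
termination_by (n - 9223372036854775807).toNat
decreasing_by omega

-- `while num < MIN_LONG: num = num + (1 << 64)`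
def pvWrapUp (n : Int) : Int :=
  if n < -9223372036854775808 then pvWrapUp (n + 18446744073709551616) else n
termination_by (-9223372036854775808 - n).toNat
decreasing_by omega

-- `value` is a String, so A always takes the `int(value, 16)` branch; ValueError (none) is
-- excluded by Pre_ (the port returns 0 there, outside the claim).
def to_long (value : String) : Int :=
  match pvParseHexInt? value with
  | some num => pvWrapUp (pvWrapDown num)
  | none => 0

-- ===== PORT B =====
-- B-side hand port of the same builtin, in staged passes: first VALIDATE the digit run with
-- closed-form shape checks (non-empty, hex digits and underscores, no doubled / leading /
-- trailing underscore), then EVALUATE by one fold over the underscore-free digit list.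
def pvHexDigitB (c : Char) : Bool :=
  ('0' ≤ c && c ≤ '9') || ('a' ≤ c && c ≤ 'f') || ('A' ≤ c && c ≤ 'F')

def pvNoDoubleUnderscore (ds : List Char) : Bool :=
  (ds.zip ds.tail).all (fun p => !(p.1 == '_' && p.2 == '_'))

def pvRunOkB (ds : List Char) (afterPrefix : Bool) : Bool :=
  !ds.isEmpty && ds.all (fun c => pvHexDigitB c || c == '_') &&
  pvNoDoubleUnderscore ds &&
  (afterPrefix || !(ds.head? == some '_')) && !(ds.getLast? == some '_')

-- hex value of a VALIDATED digit character (only ever applied after pvRunOkB succeeded)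
def pvHexValB (c : Char) : Nat :=
  if c ≤ '9' then c.toNat - 48 else if c ≤ 'F' then c.toNat - 55 else c.toNat - 87

def pvDigitsVal (ds : List Char) : Int :=
  (ds.filter (fun c => c != '_')).foldl (fun a c => 16 * a + (pvHexValB c : Int)) 0

def pvBodyValB (body : List Char) : Option Int :=
  if body.take 2 = ['0', 'x'] ∨ body.take 2 = ['0', 'X'] then
    if pvRunOkB (body.drop 2) true then some (pvDigitsVal (body.drop 2)) else none
  else
    if pvRunOkB body false then some (pvDigitsVal body) else none

def to_long_alt (value : String) : Int :=
  let cs := ((value.toList.dropWhile pvIsSpace).reverse.dropWhile pvIsSpace).reverse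
  let sgn : Int := if cs.head? = some '-' then -1 else 1
  let body := if cs.head? = some '+' ∨ cs.head? = some '-' then cs.tail else cs
  match pvBodyValB body with
  | some mag =>
      ((sgn * mag + 9223372036854775808) % 18446744073709551616) - 9223372036854775808
  | none => 0

-- ===== PRECONDITION & SPEC =====
-- Pre_: `value` is a valid base-16 integer literal — optional surrounding whitespace,
-- optional sign, optional 0x/0X prefix, then a well-formed hex digit run; on anything else
-- the Python A raises ValueError (int(value, 16)).
def Pre_to_long (value : String) : Prop :=
  let cs := ((value.toList.dropWhile pvIsSpace).reverse.dropWhile pvIsSpace).reverse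
  let body := if cs.head? = some '+' ∨ cs.head? = some '-' then cs.tail else cs
  (if body.take 2 = ['0', 'x'] ∨ body.take 2 = ['0', 'X'] then pvRunOkB (body.drop 2) true
   else pvRunOkB body false) = true
instance (value : String) : Decidable (Pre_to_long value) := by unfold Pre_to_long; infer_instance
def pvWitness_to_long : String := "1A"

def Spec_to_long (value : String) (out : Int) : Prop := out = to_long_alt value
instance (value : String) (out : Int) : Decidable (Spec_to_long value out) := by unfold Spec_to_long; infer_instance

-- ===== CLAIM (what is proved, stated in full; the proofs are below) =====
def Claim_equal_to_long : Prop := ∀ (value : String), Dom_to_long value → Pre_to_long value → Spec_to_long value (to_long value)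

-- ===== LEMMAS AND PROOFS =====
theorem pvWrapUp_eq (n : Int) (h : n ≤ 9223372036854775807) :
    pvWrapUp n = (n + 9223372036854775808) % 18446744073709551616 - 9223372036854775808 := by
  fun_induction pvWrapUp n with
  | case1 n hlt ih => rw [ih (by omega)]; omega
  | case2 n hge => omega

theorem pvWrap_eq (n : Int) :
    pvWrapUp (pvWrapDown n) = (n + 9223372036854775808) % 18446744073709551616 - 9223372036854775808 := by
  fun_induction pvWrapDown n with
  | case1 n hlt ih => rw [ih]; omega
  | case2 n hge => rw [pvWrapUp_eq n (by omega)]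

theorem pvCharFacts (c : Char) : '0'.val.toNat = 48 ∧ '9'.val.toNat = 57 ∧ 'a'.val.toNat = 97
    ∧ 'f'.val.toNat = 102 ∧ 'A'.val.toNat = 65 ∧ 'F'.val.toNat = 70 ∧ '0'.toNat = 48
    ∧ '9'.toNat = 57 ∧ 'a'.toNat = 97 ∧ 'f'.toNat = 102 ∧ 'A'.toNat = 65 ∧ 'F'.toNat = 70
    ∧ c.val.toNat = c.toNat := by
  refine ⟨rfl, rfl, rfl, rfl, rfl, rfl, rfl, rfl, rfl, rfl, rfl, rfl, rfl⟩

theorem hexVal_some {c : Char} (h : pvHexDigitB c = true) :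
    pvHexVal? c = some (pvHexValB c) := by
  obtain ⟨e1,e2,e3,e4,e5,e6,f1,f2,f3,f4,f5,f6,hc⟩ := pvCharFacts c
  simp only [pvHexDigitB, Bool.or_eq_true, Bool.and_eq_true, decide_eq_true_eq,
    Char.le_def, UInt32.le_iff_toNat_le] at h
  unfold pvHexVal? pvHexValB
  split_ifs <;> (try simp only [Char.le_def, UInt32.le_iff_toNat_le, not_le, not_and] at *) <;>
    (try simp only [Option.some.injEq]) <;> omega

theorem hexVal_none {c : Char} (h : pvHexDigitB c = false) :
    pvHexVal? c = none := by
  obtain ⟨e1,e2,e3,e4,e5,e6,f1,f2,f3,f4,f5,f6,hc⟩ := pvCharFacts c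
  simp only [pvHexDigitB, Bool.or_eq_false_iff, Bool.and_eq_false_iff,
    decide_eq_false_iff_not, Char.le_def, UInt32.le_iff_toNat_le, not_le] at h
  unfold pvHexVal?
  split_ifs <;> (try simp only [Char.le_def, UInt32.le_iff_toNat_le, not_le, not_and] at *) <;>
    first | rfl | omega

theorem ndu_tail {c : Char} {r : List Char} (h : pvNoDoubleUnderscore (c :: r) = true) :
    pvNoDoubleUnderscore r = true := by
  cases r with
  | nil => rfl
  | cons d r' =>
    simp only [pvNoDoubleUnderscore, List.tail_cons, List.zip_cons_cons, List.all_cons,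
      Bool.and_eq_true] at h ⊢
    exact h.2

theorem ndu_head {d : Char} {r' : List Char} (h : pvNoDoubleUnderscore ('_' :: d :: r') = true) :
    ¬ d = '_' := by
  simp only [pvNoDoubleUnderscore, List.tail_cons, List.zip_cons_cons, List.all_cons,
    Bool.and_eq_true] at h
  intro hd
  subst hd
  simpa using h.1

theorem runOk_parts {ds : List Char} {ap : Bool} (h : pvRunOkB ds ap = true) :
    ¬ ds = [] ∧ (ds.all fun c => pvHexDigitB c || c == '_') = true ∧ pvNoDoubleUnderscore ds = true ∧
    (ap = true ∨ ¬ ds.head? = some '_') ∧ ¬ ds.getLast? = some '_' := by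
  unfold pvRunOkB at h
  simp only [Bool.and_eq_true] at h
  obtain ⟨⟨⟨⟨h1, h2⟩, h3⟩, h4⟩, h5⟩ := h
  refine ⟨?_, h2, h3, ?_, ?_⟩
  · intro h'; subst h'; simp at h1
  · cases ap
    · right
      simp only [Bool.false_or, Bool.not_eq_true'] at h4
      simpa using h4
    · left; rfl
  · simp only [Bool.not_eq_true'] at h5
    simpa using h5

theorem digits_eval (ds : List Char) (acc : Int) (prev : Bool)
    (hall : ds.all (fun c => pvHexDigitB c || c == '_') = true)
    (hch : pvNoDoubleUnderscore ds = true)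
    (hhead : prev = true ∨ ¬ ds.head? = some '_')
    (hlast : ¬ ds.getLast? = some '_')
    (hne : ds = [] → prev = true) :
    pvHexDigits? ds acc prev =
      some ((ds.filter (fun c => c != '_')).foldl (fun a c => 16 * a + (pvHexValB c : Int)) acc) := by
  induction ds generalizing acc prev with
  | nil => simp [pvHexDigits?, hne rfl]
  | cons c r ih =>
    simp only [List.all_cons, Bool.and_eq_true, Bool.or_eq_true] at hall
    obtain ⟨hc, hallr⟩ := hall
    by_cases hd : pvHexDigitB c = true
    · have hv := hexVal_some hd
      have hcu : (c != '_') = true := by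
        simp only [bne_iff_ne, ne_eq]
        intro h'
        subst h'
        exact absurd hd (by decide)
      have step : pvHexDigits? (c :: r) acc prev = pvHexDigits? r (acc * 16 + (pvHexValB c : Int)) true := by
        simp [pvHexDigits?, hv]
      rw [step]
      rw [ih (acc * 16 + (pvHexValB c : Int)) true hallr (ndu_tail hch) (Or.inl rfl)
        (by cases r with
            | nil => simp
            | cons d r' => rwa [List.getLast?_cons_cons] at hlast)
        (by intro _; rfl)]
      simp only [List.filter_cons, hcu, if_pos]
      rw [List.foldl_cons]
      ring_nf
    · have hcu : c = '_' := by
        rcases hc with h' | h'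
        · exact absurd h' hd
        · simpa using h'
      subst hcu
      have hprev : prev = true := by
        rcases hhead with h' | h'
        · exact h'
        · exact absurd rfl h'
      subst hprev
      have step : pvHexDigits? ('_' :: r) acc true = pvHexDigits? r acc false := by
        simp [pvHexDigits?, hexVal_none (c := '_') (by decide)]
      rw [step]
      cases r with
      | nil => exact absurd (by simp) hlast
      | cons d r' =>
        rw [ih acc false hallr (ndu_tail hch)
          (Or.inr (by simpa using ndu_head hch))
          (by rwa [List.getLast?_cons_cons] at hlast)
          (by intro h'; cases h')]
        simp

theorem body_eval (body : List Char)
    (h : (if body.take 2 = ['0', 'x'] ∨ body.take 2 = ['0', 'X'] then pvRunOkB (body.drop 2) true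
          else pvRunOkB body false) = true) :
    pvHexBody? body = pvBodyValB body ∧ (pvBodyValB body).isSome = true := by
  unfold pvHexBody? pvBodyValB
  by_cases hp : body.take 2 = ['0', 'x'] ∨ body.take 2 = ['0', 'X']
  · rw [if_pos hp] at h
    obtain ⟨h1, h2, h3, _, h5⟩ := runOk_parts h
    rw [if_pos hp, if_pos hp, if_pos h, if_neg h1,
      digits_eval (body.drop 2) 0 true h2 h3 (Or.inl rfl) h5 (fun h' => absurd h' h1)]
    exact ⟨rfl, rfl⟩
  · rw [if_neg hp] at h
    obtain ⟨h1, h2, h3, h4, h5⟩ := runOk_parts h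
    have h4' : ¬ body.head? = some '_' := by
      rcases h4 with h' | h'
      · simp at h'
      · exact h'
    rw [if_neg hp, if_neg hp, if_pos h,
      digits_eval body 0 false h2 h3 (Or.inr h4') h5 (fun h' => absurd h' h1)]
    exact ⟨rfl, rfl⟩

-- ===== VERDICT (by name: the statement is the Claim_ definition above) =====
theorem to_long_spec : Claim_equal_to_long := by
  intro value _ hpre
  unfold Pre_to_long at hpre
  unfold Spec_to_long to_long to_long_alt pvParseHexInt?
  dsimp only at hpre ⊢
  generalize ((value.toList.dropWhile pvIsSpace).reverse.dropWhile pvIsSpace).reverse = cs at hpre ⊢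
  by_cases hplus : cs.head? = some '+'
  · have hminus : ¬ cs.head? = some '-' := by rw [hplus]; simp
    rw [if_pos (Or.inl hplus)] at hpre ⊢
    obtain ⟨heq, hs⟩ := body_eval cs.tail hpre
    obtain ⟨m, hm⟩ := Option.isSome_iff_exists.mp hs
    rw [if_pos hplus, if_neg hminus, heq, hm]
    show pvWrapUp (pvWrapDown m) = _
    rw [pvWrap_eq m]
    ring_nf
  · by_cases hminus : cs.head? = some '-'
    · rw [if_pos (Or.inr hminus)] at hpre ⊢
      obtain ⟨heq, hs⟩ := body_eval cs.tail hpre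
      obtain ⟨m, hm⟩ := Option.isSome_iff_exists.mp hs
      rw [if_neg hplus, if_pos hminus, if_pos hminus, heq, hm]
      simp only [Option.map_some]
      show pvWrapUp (pvWrapDown (-m)) = _
      rw [pvWrap_eq (-m)]
      ring_nf
    · have hno : ¬ (cs.head? = some '+' ∨ cs.head? = some '-') := by
        rintro (h' | h')
        exacts [hplus h', hminus h']
      rw [if_neg hno] at hpre ⊢
      obtain ⟨heq, hs⟩ := body_eval cs hpre
      obtain ⟨m, hm⟩ := Option.isSome_iff_exists.mp hs
      rw [if_neg hplus, if_neg hminus, if_neg hminus, heq, hm]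
      show pvWrapUp (pvWrapDown m) = _
      rw [pvWrap_eq m]
      ring_nf
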